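-- pv_equiv track=rewrite | github.com/xinye83/advent-of-code | 2025/day10.py | patterns
-- ===== SOURCE A (Python) =====
-- from itertools import combinations
--
-- def patterns(coeffs: list[tuple[int, ...]]) -> dict[tuple[int, ...], int]:
--     out = {}
--     num_buttons = len(coeffs)
--     num_variables = len(coeffs[0])
--     for pattern_len in range(num_buttons + 1):
--         for buttons in combinations(range(num_buttons), pattern_len):
--             pattern = tuple(
--                 map(sum, zip((0,) * num_variables, *(coeffs[i] for i in buttons)))
--             )
--             if pattern not in out:
--                 out[pattern] = pattern_len
--     return out
-- ===== SOURCE B (Python) =====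
-- def patterns(coeffs: list[tuple[int, ...]]) -> dict[tuple[int, ...], int]:
--     z = (0,) * len(coeffs[0])
--     out = {z: 0}
--     level = [(coeffs, z)]  # (buttons still available after this subset, accumulated sum)
--     for k in range(1, len(coeffs) + 1):
--         nxt = []
--         for rest, p in level:
--             for j in range(len(rest)):
--                 q = tuple(a + b for a, b in zip(p, rest[j]))
--                 nxt.append((rest[j + 1:], q))
--                 if q not in out:
--                     out[q] = k
--         level = nxt
--     return out
-- ===== Notes on version B (the rewrite author's own statement) =====
-- stated objective: alternative
-- what changed: Replaces itertools.combinations with per-size recomputation of each subset sum by a breadth-first frontier of (remaining-buttons, accumulated-sum) pairs, extending each partial subset by one button so every pattern is built incrementally in O(vars) per subset.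
import Mathlib
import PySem

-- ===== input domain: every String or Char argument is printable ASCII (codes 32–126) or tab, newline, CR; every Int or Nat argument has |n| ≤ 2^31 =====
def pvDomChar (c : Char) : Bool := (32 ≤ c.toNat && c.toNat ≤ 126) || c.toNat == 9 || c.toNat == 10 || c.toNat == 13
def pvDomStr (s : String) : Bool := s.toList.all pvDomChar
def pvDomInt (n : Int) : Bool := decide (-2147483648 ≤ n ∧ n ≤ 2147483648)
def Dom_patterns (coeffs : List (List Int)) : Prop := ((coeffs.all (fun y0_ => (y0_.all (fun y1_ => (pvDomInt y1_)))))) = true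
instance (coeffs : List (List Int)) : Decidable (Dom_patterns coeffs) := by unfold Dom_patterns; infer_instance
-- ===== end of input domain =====

-- B replaces A's combinations-plus-recomputed-sums enumeration by a breadth-first frontier
-- of (remaining buttons, accumulated sum) pairs; equivalence is proved on nonempty inputs.

-- ===== PORT A =====
-- tuple(map(sum, zip((0,)*V, *rows))) = left fold of the truncating pointwise sum over rows,
-- starting from (0,)*V: zip truncates to the minimum length, which the binary fold preserves.
def addVec (p r : List Int) : List Int := List.zipWith (· + ·) p r

def patterns (coeffs : List (List Int)) : List (List Int × Int) :=
  (match PySem.List.pyGet? coeffs 0 with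
   | none => PySem.Dict.empty            -- coeffs[0] raises IndexError (outside Pre_)
   | some c0 =>
     let numButtons := coeffs.length
     let numVariables := c0.length
     (PySem.List.pyRange 0 ((numButtons : Int) + 1) 1).foldl (fun out (k : Int) =>
       (PySem.List.combinations (PySem.List.pyRange 0 (numButtons : Int) 1) k.toNat).foldl
         (fun out (buttons : List Int) =>
           let pattern := (buttons.map (fun i => PySem.List.pyGetD coeffs i [])).foldl addVec
               (List.replicate numVariables (0 : Int))
           if out.contains pattern then out else out.insert pattern k)
         out)
       PySem.Dict.empty).items

-- ===== PORT B =====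
-- inner loop of Source B: for j in range(len(rest)): extend the subset by rest[j], keep (rest[j+1:], q)
def expandB (rest : List (List Int)) (p : List Int) (k : Int)
    (acc : List (List (List Int) × List Int) × PySem.Dict (List Int) Int) :
    List (List (List Int) × List Int) × PySem.Dict (List Int) Int :=
  match rest with
  | [] => acc
  | r :: rs =>
    let q := addVec p r
    let out := if acc.2.contains q then acc.2 else acc.2.insert q k
    expandB rs p k (acc.1 ++ [(rs, q)], out)

def patterns_alt (coeffs : List (List Int)) : List (List Int × Int) :=
  (match coeffs with
   | [] => PySem.Dict.empty              -- coeffs[0] raises IndexError (outside Pre_)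
   | c0 :: _ =>
     let z := List.replicate c0.length (0 : Int)
     let st :=
       (PySem.List.pyRange 1 ((coeffs.length : Int) + 1) 1).foldl
         (fun (st : List (List (List Int) × List Int) × PySem.Dict (List Int) Int) k =>
           st.1.foldl (fun acc (e : List (List Int) × List Int) => expandB e.1 e.2 k acc) ([], st.2))
         ([(coeffs, z)], PySem.Dict.insert PySem.Dict.empty z 0)
     st.2).items

-- ===== PRECONDITION & SPEC =====
-- Pre_ excludes only the empty list, on which A raises IndexError (coeffs[0]).
def Pre_patterns (coeffs : List (List Int)) : Prop := coeffs ≠ []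
instance (coeffs : List (List Int)) : Decidable (Pre_patterns coeffs) := by unfold Pre_patterns; infer_instance
def pvWitness_patterns : List (List Int) := [[1, 2], [3, 4]]

def Spec_patterns (coeffs : List (List Int)) (out : List (List Int × Int)) : Prop := out = patterns_alt coeffs
instance (coeffs : List (List Int)) (out : List (List Int × Int)) : Decidable (Spec_patterns coeffs out) := by unfold Spec_patterns; infer_instance

-- ===== CLAIM (what is proved, stated in full; the proofs are below) =====
def Claim_equal_patterns : Prop := ∀ (coeffs : List (List Int)), Dom_patterns coeffs → Pre_patterns coeffs → Spec_patterns coeffs (patterns coeffs)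

-- ===== LEMMAS AND PROOFS =====

-- conditional insert performed by both programs
def insP (k : Int) (out : PySem.Dict (List Int) Int) (q : List Int) : PySem.Dict (List Int) Int :=
  if out.contains q then out else out.insert q k

-- the list of (remaining suffix, extended sum) pairs one frontier entry generates
def expandE (rest : List (List Int)) (p : List Int) : List (List (List Int) × List Int) :=
  match rest with
  | [] => []
  | r :: rs => (rs, addVec p r) :: expandE rs p

-- the frontier after k extensions: annotated combinations in index-lexicographic order
def CA (l : List (List Int)) (k : Nat) (p : List Int) : List (List (List Int) × List Int) :=
  match k, l with
  | 0, l => [(l, p)]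
  | _ + 1, [] => []
  | k + 1, r :: rs => CA rs k (addVec p r) ++ CA rs (k + 1) p

lemma expandB_eq (rest : List (List Int)) (p : List Int) (k : Int)
    (nxt : List (List (List Int) × List Int)) (out : PySem.Dict (List Int) Int) :
    expandB rest p k (nxt, out)
      = (nxt ++ expandE rest p, ((expandE rest p).map Prod.snd).foldl (insP k) out) := by
  induction rest generalizing nxt out with
  | nil => simp [expandB, expandE]
  | cons r rs ih => simp [expandB, expandE, ih, insP]

lemma level_fold_eq (level : List (List (List Int) × List Int)) (k : Int)
    (nxt : List (List (List Int) × List Int)) (out : PySem.Dict (List Int) Int) :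
    level.foldl (fun acc (e : List (List Int) × List Int) => expandB e.1 e.2 k acc) (nxt, out)
      = (nxt ++ level.flatMap (fun e => expandE e.1 e.2),
         ((level.flatMap (fun e => expandE e.1 e.2)).map Prod.snd).foldl (insP k) out) := by
  induction level generalizing nxt out with
  | nil => simp
  | cons e level ih =>
    simp only [List.foldl_cons, expandB_eq, ih, List.flatMap_cons, List.map_append,
      List.foldl_append, List.append_assoc]

lemma expandE_eq_CA_one (l : List (List Int)) (p : List Int) : expandE l p = CA l 1 p := by
  induction l generalizing p with
  | nil => simp [expandE, CA]
  | cons r rs ih => simp [expandE, CA, ih]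

lemma CA_succ (k : Nat) (l : List (List Int)) (p : List Int) :
    CA l (k + 1) p = (CA l k p).flatMap (fun e => expandE e.1 e.2) := by
  induction k generalizing l p with
  | zero => simp [CA, expandE_eq_CA_one]
  | succ k ihk =>
    induction l generalizing p with
    | nil => simp [CA]
    | cons r rs ihl => simp only [CA, List.flatMap_append, ← ihk, ← ihl]

lemma CA_map_snd (k : Nat) (l : List (List Int)) (p : List Int) :
    (CA l k p).map Prod.snd = (PySem.List.combinations l k).map (fun c => c.foldl addVec p) := by
  induction k generalizing l p with
  | zero => simp [CA, PySem.List.combinations_zero]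
  | succ k ihk =>
    induction l generalizing p with
    | nil => simp [CA, PySem.List.combinations_nil_succ]
    | cons r rs ihl =>
      simp only [CA, List.map_append, ihk, ihl, PySem.List.combinations_cons_succ,
        List.map_map]
      rfl

-- the simultaneous induction: B's state after m outer iterations
lemma simul (coeffs : List (List Int)) (z : List Int) (d0 : PySem.Dict (List Int) Int)
    (m : Nat) :
    (List.range m).foldl
      (fun (st : List (List (List Int) × List Int) × PySem.Dict (List Int) Int) (j : Nat) =>
        st.1.foldl (fun acc (e : List (List Int) × List Int) => expandB e.1 e.2 (1 + (j : Int)) acc) ([], st.2))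
      (CA coeffs 0 z, d0)
    = (CA coeffs m z,
       (List.range m).foldl
         (fun out (j : Nat) => ((CA coeffs (j + 1) z).map Prod.snd).foldl (insP (1 + (j : Int))) out)
         d0) := by
  induction m with
  | zero => simp
  | succ m ih =>
    rw [List.range_succ, List.foldl_append, List.foldl_append, ih]
    simp only [List.foldl_cons, List.foldl_nil, level_fold_eq, List.nil_append, ← CA_succ]

lemma A_inner (coeffs : List (List Int)) (z : List Int) (k : Nat) (v : Int)
    (out : PySem.Dict (List Int) Int) :
    (PySem.List.combinations ((List.range coeffs.length).map (fun i : Nat => (i : Int))) k).foldl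
      (fun out (buttons : List Int) =>
        insP v out ((buttons.map (fun i => PySem.List.pyGetD coeffs i [])).foldl addVec z)) out
    = ((CA coeffs k z).map Prod.snd).foldl (insP v) out := by
  have hmap : ((List.range coeffs.length).map (fun i : Nat => (i : Int))).map
      (fun j => PySem.List.pyGetD coeffs j ([] : List Int)) = coeffs := by
    rw [← PySem.List.pyRange_zero_nat]
    exact PySem.List.map_pyGetD_pyRange_zero' coeffs ([] : List Int)
  rw [CA_map_snd]
  conv_rhs => rw [← hmap]
  simp [PySem.List.combinations_map, List.foldl_map, List.map_map, Function.comp]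

lemma patterns_cons (c0 : List Int) (cs : List (List Int)) :
    patterns (c0 :: cs) = patterns_alt (c0 :: cs) := by
  have hcast : ((((c0 :: cs).length : Int)) + 1) = (((c0 :: cs).length + 1 : Nat) : Int) := by
    push_cast; ring
  have hA : patterns (c0 :: cs)
      = ((List.range ((c0 :: cs).length + 1)).foldl
          (fun out (j : Nat) =>
            ((CA (c0 :: cs) j (List.replicate c0.length (0 : Int))).map Prod.snd).foldl
              (insP (j : Int)) out)
          PySem.Dict.empty).items := by
    simp only [patterns, PySem.List.pyGet?_zero_cons]
    rw [hcast]
    simp only [PySem.List.pyRange_zero_nat]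
    rw [List.foldl_map]
    congr 1
    refine PySem.List.foldl_congr_mem _ _ _ _ ?_
    intro acc j _
    rw [show ((j : Int)).toNat = j from Int.toNat_natCast j]
    exact A_inner (c0 :: cs) _ j (j : Int) acc
  have hB : patterns_alt (c0 :: cs)
      = ((List.range (c0 :: cs).length).foldl
          (fun (st : List (List (List Int) × List Int) × PySem.Dict (List Int) Int) (j : Nat) =>
            st.1.foldl (fun acc (e : List (List Int) × List Int) =>
              expandB e.1 e.2 (1 + (j : Int)) acc) ([], st.2))
          (CA (c0 :: cs) 0 (List.replicate c0.length (0 : Int)),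
            PySem.Dict.insert PySem.Dict.empty (List.replicate c0.length (0 : Int)) 0)).2.items := by
    simp only [patterns_alt]
    rw [PySem.List.pyRange_one]
    norm_num
    rw [List.foldl_map]
    rfl
  rw [hA, hB, simul]
  congr 1
  rw [List.range_succ_eq_map, List.foldl_cons, List.foldl_map]
  have h0 : ((CA (c0 :: cs) 0 (List.replicate c0.length (0 : Int))).map Prod.snd).foldl
      (insP ((0 : Nat) : Int)) PySem.Dict.empty
      = PySem.Dict.insert PySem.Dict.empty (List.replicate c0.length (0 : Int)) 0 := by
    simp [CA, insP, PySem.Dict.contains_empty]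
  rw [h0]
  refine PySem.List.foldl_congr_mem _ _ _ _ ?_
  intro acc j _
  have : ((Nat.succ j : Nat) : Int) = 1 + (j : Int) := by push_cast; ring
  rw [this]

-- ===== VERDICT (by name: the statement is the Claim_ definition above) =====
theorem patterns_spec : Claim_equal_patterns := by
  intro coeffs _ hpre
  unfold Spec_patterns
  cases coeffs with
  | nil => exact absurd rfl hpre
  | cons c0 cs => exact patterns_cons c0 cs
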